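-- pv_equiv track=rewrite | github.com/AmjadKudsi/AI-agents-with-custom-tools | 3) Enhancing Agents with Custom Tools and RAG/1) Simple Agent with RAG/solution1.py | rag_retrieval
-- ===== SOURCE A (Python) =====
-- def rag_retrieval(query, knowledge_base):
--     query_words = set(query.lower().split())
--     matched_docs = []
--
--     for doc in knowledge_base:
--         doc_words = set(doc["content"].lower().split())
--         overlap = len(query_words.intersection(doc_words))
--         if overlap > 0:
--             matched_docs.append((overlap, doc))
--
--     matched_docs.sort(key=lambda x: x[0], reverse=True)
--     return [doc for overlap, doc in matched_docs]
-- ===== SOURCE B (Python) =====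
-- def rag_retrieval(query, knowledge_base):
--     query_words = set(query.lower().split())
--
--     # inverted index: word -> positions (in order) of the docs containing it
--     index = {}
--     for i, doc in enumerate(knowledge_base):
--         for w in set(doc["content"].lower().split()):
--             index.setdefault(w, []).append(i)
--
--     # accumulate each doc's score from the postings of the query words
--     score = [0] * len(knowledge_base)
--     for w in query_words:
--         for i in index.get(w, []):
--             score[i] += 1
--
--     # counting-sort style output: scores descend from the maximum possible
--     # (len(query_words)); within one score, docs keep their original order
--     result = []
--     for s in range(len(query_words), 0, -1):
--         for i, doc in enumerate(knowledge_base):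
--             if score[i] == s:
--                 result.append(doc)
--     return result
-- ===== Notes on version B (the rewrite author's own statement) =====
-- stated objective: alternative
-- what changed: B replaces A's per-doc set intersection plus stable sort of tagged tuples with an inverted index (word -> doc positions) whose postings for the query words accumulate per-doc scores, emitted by a counting-sort pass over the possible scores in descending order; no intersection and no comparison sort are performed.
import Mathlib
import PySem

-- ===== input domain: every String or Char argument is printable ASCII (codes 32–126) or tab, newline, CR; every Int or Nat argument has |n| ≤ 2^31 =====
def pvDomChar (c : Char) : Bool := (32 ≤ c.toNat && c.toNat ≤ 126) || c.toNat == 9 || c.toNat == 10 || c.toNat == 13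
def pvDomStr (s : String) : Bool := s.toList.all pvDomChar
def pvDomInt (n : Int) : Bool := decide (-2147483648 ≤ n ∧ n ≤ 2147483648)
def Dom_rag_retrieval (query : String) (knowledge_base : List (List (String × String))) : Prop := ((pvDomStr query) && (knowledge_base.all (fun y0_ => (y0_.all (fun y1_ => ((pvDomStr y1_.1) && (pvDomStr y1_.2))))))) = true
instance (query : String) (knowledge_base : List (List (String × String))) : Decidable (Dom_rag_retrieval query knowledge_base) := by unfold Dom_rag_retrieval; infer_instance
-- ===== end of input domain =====

-- B replaces A's per-doc set intersection and stable sort of tagged tuples with an inverted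
-- index (word -> doc positions) accumulating per-doc scores, emitted by a counting-sort pass
-- over the possible scores in descending order; alternative algorithm, same return value.

-- ===== PORT A =====
-- shared tokenization helper: set(s.lower().split())  (identical line in both Pythons)
def pvTok (s : String) : PySem.Set String :=
  PySem.Set.ofList (PySem.Str.split₀ (PySem.Str.lower s))

-- set(doc["content"].lower().split()); doc["content"] is read with default "" only to make the
-- port total — Pre_ excludes docs without the "content" key (KeyError in both Pythons).
def pvDocTok (doc : List (String × String)) : PySem.Set String :=
  pvTok (PySem.Dict.getD (PySem.Dict.mk doc) "content" "")

-- len(query_words.intersection(doc_words))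
def pvOverlap (qw : PySem.Set String) (doc : List (String × String)) : Int :=
  PySem.Set.len (PySem.Set.inter qw (pvDocTok doc))

def rag_retrieval (query : String) (knowledge_base : List (List (String × String))) : List (List (String × String)) :=
  let query_words := pvTok query
  let matched_docs := knowledge_base.foldl (fun acc doc =>
      let overlap := pvOverlap query_words doc
      if overlap > 0 then acc ++ [(overlap, doc)] else acc) []
  (PySem.List.sorted matched_docs (fun x => x.1) true).map (fun x => x.2)

-- ===== PORT B =====
def rag_retrieval_alt (query : String) (knowledge_base : List (List (String × String))) : List (List (String × String)) :=
  let query_words := pvTok query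
  -- index = {}; for i, doc in enumerate(kb): for w in set(...): index.setdefault(w, []).append(i)
  let index : PySem.Dict String (List Int) :=
    (PySem.List.enumerate knowledge_base 0).foldl (fun d p =>
      (pvDocTok p.2).foldl (fun d w => d.insert w (d.getD w [] ++ [p.1])) d) PySem.Dict.empty
  -- score = [0]*len(kb); for w in query_words: for i in index.get(w, []): score[i] += 1
  let score : List Int :=
    query_words.foldl (fun sc w =>
      (index.getD w []).foldl (fun sc i =>
        PySem.List.pySetD sc i (PySem.List.pyGetD sc i 0 + 1)) sc)
      (List.replicate knowledge_base.length 0)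
  -- for s in range(len(query_words), 0, -1): for i, doc in enumerate(kb): if score[i] == s: append
  (PySem.List.pyRange (PySem.Set.len query_words) 0 (-1)).foldl (fun result s =>
    (PySem.List.enumerate knowledge_base 0).foldl (fun result p =>
      if PySem.List.pyGetD score p.1 0 == s then result ++ [p.2] else result) result) []

-- ===== PRECONDITION & SPEC =====
-- Pre_ excludes exactly the docs on which Python's doc["content"] raises KeyError (both A and B raise there).
def Pre_rag_retrieval (query : String) (knowledge_base : List (List (String × String))) : Prop :=
  ∀ doc ∈ knowledge_base, ((PySem.Dict.mk doc).get? "content").isSome = true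
instance (query : String) (knowledge_base : List (List (String × String))) : Decidable (Pre_rag_retrieval query knowledge_base) := by unfold Pre_rag_retrieval; infer_instance
def pvWitness_rag_retrieval : String × (List (List (String × String))) :=
  ("hello world", [[("content", "hello there")], [("content", "world world hello")], [("content", "nothing")]])

def Spec_rag_retrieval (query : String) (knowledge_base : List (List (String × String))) (out : List (List (String × String))) : Prop := out = rag_retrieval_alt query knowledge_base
instance (query : String) (knowledge_base : List (List (String × String))) (out : List (List (String × String))) : Decidable (Spec_rag_retrieval query knowledge_base out) := by unfold Spec_rag_retrieval; infer_instance

-- ===== CLAIM (what is proved, stated in full; the proofs are below) =====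
def Claim_equal_rag_retrieval : Prop := ∀ (query : String) (knowledge_base : List (List (String × String))), Dom_rag_retrieval query knowledge_base → Pre_rag_retrieval query knowledge_base → Spec_rag_retrieval query knowledge_base (rag_retrieval query knowledge_base)

-- ===== LEMMAS AND PROOFS =====

-- the (overlap, doc) pairs A collects, as filter+map
def pvTagged (qw : PySem.Set String) (kb : List (List (String × String))) : List (Int × List (String × String)) :=
  (kb.filter (fun doc => decide (0 < pvOverlap qw doc))).map (fun doc => (pvOverlap qw doc, doc))

lemma pvFoldA (qw : PySem.Set String) (kb : List (List (String × String))) (acc : List (Int × List (String × String))) :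
    kb.foldl (fun acc doc =>
      let overlap := pvOverlap qw doc
      if overlap > 0 then acc ++ [(overlap, doc)] else acc) acc = acc ++ pvTagged qw kb := by
  have h := PySem.List.foldl_append_if (fun doc => decide (0 < pvOverlap qw doc))
      (fun doc => (pvOverlap qw doc, doc)) kb acc
  simpa [pvTagged, decide_eq_true_eq] using h

-- ---- B side: the inverted index ----

-- inner loop over one doc's (distinct) token set
lemma pvIdxInner (s : List String) (i : Int) (d : PySem.Dict String (List Int)) (v : String) :
    (s.foldl (fun d w => d.insert w (d.getD w [] ++ [i])) d).getD v []
      = d.getD v [] ++ List.replicate (s.count v) i := by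
  induction s generalizing d with
  | nil => simp
  | cons w rest ih =>
    rw [List.foldl_cons, ih]
    by_cases h : v = w
    · subst h
      simp [PySem.Dict.getD_insert, List.count_cons, List.replicate_succ]
    · have h' : ¬ (w = v) := fun hh => h hh.symm
      simp [PySem.Dict.getD_insert, h, List.count_cons, h']

lemma pvIdxInnerSet (s : PySem.Set String) (hs : s.Nodup) (i : Int) (d : PySem.Dict String (List Int)) (v : String) :
    (s.foldl (fun d w => d.insert w (d.getD w [] ++ [i])) d).getD v []
      = d.getD v [] ++ (if v ∈ s then [i] else []) := by
  rw [pvIdxInner]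
  by_cases h : v ∈ s
  · rw [List.count_eq_one_of_mem hs h]; simp [h]
  · rw [List.count_eq_zero_of_not_mem h]; simp [h]

-- the postings list of word v, in document order
def pvPost (kb : List (List (String × String))) (v : String) : List Int :=
  ((PySem.List.enumerate kb 0).filter (fun p => decide (v ∈ pvDocTok p.2))).map (fun p => p.1)

lemma pvDocTok_nodup (doc : List (String × String)) : (pvDocTok doc).Nodup :=
  PySem.Set.nodup_ofList _

lemma pvIdxBuild (l : List (Int × List (String × String))) (d : PySem.Dict String (List Int)) (v : String) :
    (l.foldl (fun d p => (pvDocTok p.2).foldl (fun d w => d.insert w (d.getD w [] ++ [p.1])) d) d).getD v []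
      = d.getD v [] ++ (l.filter (fun p => decide (v ∈ pvDocTok p.2))).map (fun p => p.1) := by
  induction l generalizing d with
  | nil => simp
  | cons p rest ih =>
    rw [List.foldl_cons, ih, pvIdxInnerSet _ (pvDocTok_nodup p.2)]
    by_cases h : v ∈ pvDocTok p.2 <;> simp [h]

-- ---- B side: the score accumulation ----

lemma pvIncrLen (ps : List Int) (sc : List Int) :
    (ps.foldl (fun sc i => PySem.List.pySetD sc i (PySem.List.pyGetD sc i 0 + 1)) sc).length
      = sc.length := by
  induction ps generalizing sc with
  | nil => rfl
  | cons i rest ih => rw [List.foldl_cons, ih, PySem.List.length_pySetD]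

lemma pvIncrGetD (ps : List Int) (sc : List Int) (j : Int) (hj : 0 ≤ j)
    (hps : ∀ i ∈ ps, 0 ≤ i ∧ i < (sc.length : Int)) :
    PySem.List.pyGetD (ps.foldl (fun sc i => PySem.List.pySetD sc i (PySem.List.pyGetD sc i 0 + 1)) sc) j 0
      = PySem.List.pyGetD sc j 0 + (ps.count j : Int) := by
  induction ps generalizing sc with
  | nil => simp
  | cons i rest ih =>
    obtain ⟨hi0, hilt⟩ := hps i List.mem_cons_self
    have hlen : (PySem.List.pySetD sc i (PySem.List.pyGetD sc i 0 + 1)).length = sc.length :=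
      PySem.List.length_pySetD ..
    rw [List.foldl_cons, ih _ (by intro a ha; rw [hlen]; exact hps a (List.mem_cons_of_mem _ ha))]
    have hlt : i.toNat < sc.length := by omega
    have key : PySem.List.pyGetD (PySem.List.pySetD sc i (PySem.List.pyGetD sc i 0 + 1)) j 0
        = if j.toNat = i.toNat then PySem.List.pyGetD sc i 0 + 1 else PySem.List.pyGetD sc j 0 := by
      rw [show i = ((i.toNat : Nat) : Int) from (Int.toNat_of_nonneg hi0).symm,
        show j = ((j.toNat : Nat) : Int) from (Int.toNat_of_nonneg hj).symm]
      exact PySem.List.pyGetD_pySetD_natCast sc i.toNat j.toNat _ _ hlt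
    rw [key]
    by_cases hji : j = i
    · subst hji
      simp [List.count_cons]
      ring
    · have h1 : ¬ (j.toNat = i.toNat) := by omega
      have h2 : ¬ (i = j) := fun hh => hji hh.symm
      simp [h1, List.count_cons, h2]

lemma pvScoreFold (ws : List String) (idx : PySem.Dict String (List Int)) (sc : List Int) (n : Nat)
    (j : Int) (hj : 0 ≤ j) (hlen : sc.length = n)
    (hidx : ∀ w, ∀ i ∈ idx.getD w [], 0 ≤ i ∧ i < (n : Int)) :
    PySem.List.pyGetD (ws.foldl (fun sc w => (idx.getD w []).foldl (fun sc i =>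
        PySem.List.pySetD sc i (PySem.List.pyGetD sc i 0 + 1)) sc) sc) j 0
      = PySem.List.pyGetD sc j 0 + ((ws.map (fun w => ((idx.getD w []).count j : Int))).sum) := by
  induction ws generalizing sc with
  | nil => simp
  | cons w rest ih =>
    have hlen' :
        ((idx.getD w []).foldl (fun sc i =>
          PySem.List.pySetD sc i (PySem.List.pyGetD sc i 0 + 1)) sc).length = n := by
      rw [pvIncrLen]; exact hlen
    rw [List.foldl_cons, ih _ hlen',
      pvIncrGetD _ _ _ hj (by intro a ha; rw [hlen]; exact hidx w a ha)]
    simp [add_assoc]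

-- count of one fixed position in a postings list
lemma pvPostCount (kb : List (List (String × String))) (s : Int) (v : String) (k : Nat) (hk : k < kb.length) :
    ((((PySem.List.enumerate kb s).filter (fun p => decide (v ∈ pvDocTok p.2))).map (fun p => p.1)).count (s + k))
      = if v ∈ pvDocTok kb[k] then 1 else 0 := by
  induction kb generalizing s k with
  | nil => simp at hk
  | cons doc rest ih =>
    rw [PySem.List.enumerate_cons]
    have hge : ∀ q ∈ PySem.List.enumerate rest (s + 1), s + 1 ≤ q.1 := by
      intro q hq
      rcases (PySem.List.mem_enumerate_iff _ _ _).mp hq with ⟨m, hm, rfl⟩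
      omega
    cases k with
    | zero =>
      have hnot : (s : Int) ∉ (((PySem.List.enumerate rest (s + 1)).filter
            (fun p => decide (v ∈ pvDocTok p.2))).map (fun p => p.1)) := by
        intro hmem
        rcases List.mem_map.mp hmem with ⟨q, hq, hqe⟩
        have := hge q (List.mem_filter.mp hq).1
        omega
      by_cases h : v ∈ pvDocTok doc
      · simp [h, List.filter_cons, List.count_cons, List.count_eq_zero_of_not_mem hnot]
      · simp [h, List.filter_cons, List.count_eq_zero_of_not_mem hnot]
    | succ m =>
      have hm : m < rest.length := by simpa using hk
      have hrec := ih (s + 1) m hm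
      have harith : (s + 1) + (m : Int) = s + ((m + 1 : Nat) : Int) := by push_cast; ring
      rw [harith] at hrec
      have hne : ((s + ((m + 1 : Nat) : Int)) ≠ s) := by push_cast; omega
      by_cases h : v ∈ pvDocTok doc
      · have hz : ((m : Int) + 1) ≠ 0 := by omega
        push_cast at hrec
        simp [h, List.count_cons, hz, hrec]
      · push_cast at hrec
        simpa [h] using hrec

-- pvOverlap as a countP over the query words
lemma pvOverlap_eq_countP (qw : PySem.Set String) (doc : List (String × String)) :
    pvOverlap qw doc = ((qw.countP (fun w => decide (w ∈ pvDocTok doc)) : Nat) : Int) := by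
  simp [pvOverlap, PySem.Set.len, PySem.Set.inter, List.countP_eq_length_filter]

-- the score list produced by B reads back each doc's overlap
lemma pvScoreAt (qw : PySem.Set String) (kb : List (List (String × String))) (k : Nat) (hk : k < kb.length) :
    PySem.List.pyGetD (qw.foldl (fun sc w =>
        (((PySem.List.enumerate kb 0).foldl (fun d p =>
            (pvDocTok p.2).foldl (fun d w => d.insert w (d.getD w [] ++ [p.1])) d)
          PySem.Dict.empty).getD w []).foldl (fun sc i =>
          PySem.List.pySetD sc i (PySem.List.pyGetD sc i 0 + 1)) sc)
        (List.replicate kb.length 0)) ((k : Nat) : Int) 0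
      = pvOverlap qw kb[k] := by
  set idx := (PySem.List.enumerate kb 0).foldl (fun d p =>
      (pvDocTok p.2).foldl (fun d w => d.insert w (d.getD w [] ++ [p.1])) d)
    PySem.Dict.empty with hidxdef
  have hidxget : ∀ v, idx.getD v [] = pvPost kb v := by
    intro v
    rw [hidxdef, pvIdxBuild]
    simp [pvPost]
  have hbound : ∀ w, ∀ i ∈ idx.getD w [], 0 ≤ i ∧ i < (kb.length : Int) := by
    intro w i hi
    rw [hidxget] at hi
    rcases List.mem_map.mp hi with ⟨q, hq, rfl⟩
    rcases (PySem.List.mem_enumerate_iff _ _ _).mp (List.mem_filter.mp hq).1 with ⟨m, hm, rfl⟩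
    constructor <;> simp <;> omega
  rw [pvScoreFold qw idx _ kb.length ((k : Nat) : Int) (by positivity) (by simp) hbound]
  have hzero : PySem.List.pyGetD (List.replicate kb.length (0 : Int)) ((k : Nat) : Int) 0 = 0 := by
    rw [PySem.List.pyGetD_natCast]
    simp
  rw [hzero, zero_add]
  have hterm : ∀ w ∈ qw, ((idx.getD w []).count ((k : Nat) : Int) : Int)
      = if w ∈ pvDocTok kb[k] then 1 else 0 := by
    intro w _
    rw [hidxget w]
    have := pvPostCount kb 0 w k hk
    rw [zero_add] at this
    rw [pvPost, this]
    by_cases h : w ∈ pvDocTok kb[k] <;> simp [h]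
  rw [List.map_congr_left hterm, pvOverlap_eq_countP]
  have := PySem.List.sum_map_ite_one_zero (fun w => decide (w ∈ pvDocTok kb[k])) qw
  simp only [decide_eq_true_eq] at this
  rw [this]

-- ---- descending-order bookkeeping (A side, reused) ----

-- one grouping step helpers for the sorted characterization
lemma pvInsertBy_split {α : Type} (bf : α → α → Bool) (x : α) (A B : List α)
    (hA : ∀ a ∈ A, bf x a = false) (hB : ∀ b ∈ B, bf x b = true) :
    PySem.List.insertBy bf x (A ++ B) = A ++ x :: B := by
  induction A with
  | nil =>
    cases B with
    | nil => rfl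
    | cons b bs => simp [PySem.List.insertBy, hB b (by simp)]
  | cons a as ih =>
    simp only [List.cons_append, PySem.List.insertBy, hA a (by simp)]
    simp [ih (fun a' ha' => hA a' (by simp [ha'])) ]

lemma pvInsertBy_take_drop {α : Type} (bf : α → α → Bool) (x : α) (s : List α) :
    PySem.List.insertBy bf x s
    = s.takeWhile (fun y => !bf x y) ++ x :: s.dropWhile (fun y => !bf x y) := by
  induction s with
  | nil => rfl
  | cons y ys ih =>
    by_cases h : bf x y = true <;> simp [PySem.List.insertBy, h, ih]

lemma pvDescKeys_pairwise (S : List Int) :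
    (PySem.List.sorted (PySem.Set.ofList S) (fun k => k) true).Pairwise (fun a b => b < a) := by
  have h1 := PySem.List.sorted_pairwise_rev (PySem.Set.ofList S) (fun k => k)
  have h2 : (PySem.List.sorted (PySem.Set.ofList S) (fun k => k) true).Nodup :=
    ((PySem.List.sorted_perm (PySem.Set.ofList S) (fun k => k) true).nodup_iff).mpr
      (PySem.Set.nodup_ofList S)
  exact (h1.and h2).imp (fun {a b} h => lt_of_le_of_ne h.1 (Ne.symm h.2))

lemma pvSplit_bounds (K : List Int) (k : Int) (hp : K.Pairwise (fun a b => b < a)) (hnm : k ∉ K) :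
    (∀ a ∈ K.takeWhile (fun a => !decide (a < k)), k < a) ∧
    (∀ b ∈ K.dropWhile (fun a => !decide (a < k)), b < k) := by
  induction K with
  | nil => simp
  | cons h t ih =>
    rcases List.pairwise_cons.mp hp with ⟨hht, hpt⟩
    have hne : h ≠ k := fun hh => hnm (hh ▸ List.mem_cons_self)
    by_cases hlt : h < k
    · refine ⟨by simp [hlt], ?_⟩
      intro b hb
      simp only [List.dropWhile_cons, hlt, decide_true, Bool.not_true, Bool.false_eq_true,
        if_false] at hb
      rcases List.mem_cons.mp hb with hb | hb
      · exact hb ▸ hlt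
      · exact lt_trans (hht b hb) hlt
    · have hk : k < h := lt_of_le_of_ne (not_lt.mp hlt) (Ne.symm hne)
      have iht := ih hpt (fun hh => hnm (List.mem_cons_of_mem _ hh))
      refine ⟨?_, ?_⟩
      · intro a ha
        simp only [List.takeWhile_cons, hlt, decide_false, Bool.not_false, if_true] at ha
        rcases List.mem_cons.mp ha with ha | ha
        · exact ha ▸ hk
        · exact iht.1 a ha
      · intro b hb
        simp only [List.dropWhile_cons, hlt, decide_false, Bool.not_false, if_true] at hb
        exact iht.2 b hb

lemma pvMem_flatMap_fst {α : Type} (K : List Int) (l : List (Int × α)) (b : Int × α)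
    (hb : b ∈ K.flatMap (fun k => l.filter (fun e => e.1 == k))) : b.1 ∈ K := by
  rcases List.mem_flatMap.mp hb with ⟨k, hk, hbk⟩
  rcases List.mem_filter.mp hbk with ⟨_, he⟩
  exact (beq_iff_eq.mp he) ▸ hk

lemma pvFilter_nil {α : Type} (l : List (Int × α)) (k : Int) (h : k ∉ l.map (fun e => e.1)) :
    l.filter (fun e => e.1 == k) = [] := by
  rw [List.filter_eq_nil_iff]
  intro e hel heq
  exact h (List.mem_map.mpr ⟨e, hel, beq_iff_eq.mp heq⟩)

-- descending stable sort by first component = descending distinct keys, bucket by bucket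
lemma pvSorted_fst_eq_flatMap {α : Type} (l : List (Int × α)) :
    PySem.List.sorted l (fun e => e.1) true
    = (PySem.List.sorted (PySem.Set.ofList (l.map (fun e => e.1))) (fun k => k) true).flatMap
        (fun k => l.filter (fun e => e.1 == k)) := by
  induction l using List.reverseRecOn with
  | nil => rfl
  | append_singleton l e ih =>
    set k := e.1 with hk
    set S := l.map (fun e : Int × α => e.1) with hS
    set K := PySem.List.sorted (PySem.Set.ofList S) (fun k => k) true with hKdef
    have hmapS : (l ++ [e]).map (fun e : Int × α => e.1) = S ++ [k] := by simp [hS, hk]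
    have hofS : PySem.Set.ofList (S ++ [k]) = PySem.Set.add (PySem.Set.ofList S) k := by
      rw [PySem.Set.ofList_eq_foldl, PySem.Set.ofList_eq_foldl, List.foldl_append]
      rfl
    have hLHS : PySem.List.sorted (l ++ [e]) (fun e => e.1) true
        = PySem.List.insertBy (fun a b => decide (b.1 < a.1)) e
            (PySem.List.sorted l (fun e => e.1) true) := by
      rw [PySem.List.sorted_rev_eq_foldl_insertBy, PySem.List.sorted_rev_eq_foldl_insertBy,
        List.foldl_append]
      rfl
    have hpw := pvDescKeys_pairwise S
    rw [← hKdef] at hpw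
    by_cases hmem : k ∈ S
    · have hof : PySem.Set.ofList (S ++ [k]) = PySem.Set.ofList S := by
        rw [hofS]; simp [PySem.Set.add, PySem.Set.mem_ofList, hmem]
      have hkK : k ∈ K := by
        rw [hKdef, PySem.List.mem_sorted]
        exact (PySem.Set.mem_ofList S k).mpr hmem
      obtain ⟨K1, K2, hKsplit⟩ := List.append_of_mem hkK
      rw [hKsplit] at hpw
      rcases List.pairwise_append.mp hpw with ⟨hp1, hp2, h12⟩
      rcases List.pairwise_cons.mp hp2 with ⟨hk2, _⟩
      have hK1 : ∀ a ∈ K1, k < a := fun a ha => h12 a ha k List.mem_cons_self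
      rw [hmapS, hof, hLHS, ih, ← hKdef, hKsplit]
      simp only [List.flatMap_append, List.flatMap_cons]
      have hf1 : ∀ k' ∈ K1, (l ++ [e]).filter (fun e => e.1 == k')
          = l.filter (fun e => e.1 == k') := by
        intro k' hk'
        have hne : e.1 ≠ k' := fun hh => absurd (hK1 k' hk') (by rw [hk, hh]; exact lt_irrefl k')
        simp [List.filter_append, beq_iff_eq, hne]
      have hf2 : ∀ k' ∈ K2, (l ++ [e]).filter (fun e => e.1 == k')
          = l.filter (fun e => e.1 == k') := by
        intro k' hk'
        have hne : e.1 ≠ k' := fun hh => absurd (hk2 k' hk') (by rw [hk, hh]; exact lt_irrefl k')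
        simp [List.filter_append, beq_iff_eq, hne]
      have hfk : (l ++ [e]).filter (fun e => e.1 == k) = l.filter (fun e => e.1 == k) ++ [e] := by
        rw [List.filter_append]
        simp [hk]
      rw [List.flatMap_congr hf1, List.flatMap_congr hf2, hfk]
      have hsplit := pvInsertBy_split (fun a b : Int × α => decide (b.1 < a.1)) e
          (K1.flatMap (fun k' => l.filter (fun e => e.1 == k')) ++ l.filter (fun e => e.1 == k))
          (K2.flatMap (fun k' => l.filter (fun e => e.1 == k')))
          (by
            intro a ha
            rcases List.mem_append.mp ha with ha | ha
            · have := pvMem_flatMap_fst K1 l a ha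
              have := hK1 a.1 this
              simp only [decide_eq_false_iff_not, ← hk]
              exact not_lt.mpr (le_of_lt this)
            · rcases List.mem_filter.mp ha with ⟨_, he'⟩
              have : a.1 = k := beq_iff_eq.mp he'
              simp [← hk, this]
          )
          (by
            intro b hb
            have := pvMem_flatMap_fst K2 l b hb
            have := hk2 b.1 this
            simpa [← hk] using this
          )
      rw [← List.append_assoc, hsplit]
      simp
    · have hof : PySem.Set.ofList (S ++ [k]) = PySem.Set.ofList S ++ [k] := by
        rw [hofS]; simp [PySem.Set.add, PySem.Set.mem_ofList, hmem]
      have hkK : k ∉ K := by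
        rw [hKdef, PySem.List.mem_sorted]
        exact fun hh => hmem ((PySem.Set.mem_ofList S k).mp hh)
      have hK' : PySem.List.sorted (PySem.Set.ofList S ++ [k]) (fun k => k) true
          = K.takeWhile (fun y => !decide (y < k)) ++ k :: K.dropWhile (fun y => !decide (y < k)) := by
        rw [PySem.List.sorted_rev_eq_foldl_insertBy, List.foldl_append]
        have : List.foldl (fun acc x => PySem.List.insertBy (fun a b => decide (b < a)) x acc) []
            (PySem.Set.ofList S) = K := (PySem.List.sorted_rev_eq_foldl_insertBy _ _).symm
        rw [this]
        exact pvInsertBy_take_drop _ _ _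
      obtain ⟨hb1, hb2⟩ := pvSplit_bounds K k hpw hkK
      set K1 := K.takeWhile (fun y => !decide (y < k)) with hK1def
      set K2 := K.dropWhile (fun y => !decide (y < k)) with hK2def
      have hKsplit : K = K1 ++ K2 := (List.takeWhile_append_dropWhile).symm
      rw [hmapS, hof, hK', hLHS, ih]
      simp only [List.flatMap_append, List.flatMap_cons]
      have hf1 : ∀ k' ∈ K1, (l ++ [e]).filter (fun e => e.1 == k')
          = l.filter (fun e => e.1 == k') := by
        intro k' hk'
        have hne : e.1 ≠ k' := fun hh => absurd (hb1 k' hk') (by rw [hk, hh]; exact lt_irrefl k')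
        simp [List.filter_append, beq_iff_eq, hne]
      have hf2 : ∀ k' ∈ K2, (l ++ [e]).filter (fun e => e.1 == k')
          = l.filter (fun e => e.1 == k') := by
        intro k' hk'
        have hne : e.1 ≠ k' := fun hh => absurd (hb2 k' hk') (by rw [hk, hh]; exact lt_irrefl k')
        simp [List.filter_append, beq_iff_eq, hne]
      have hfk : (l ++ [e]).filter (fun e => e.1 == k) = [e] := by
        have h0 : l.filter (fun e => e.1 == k) = [] := pvFilter_nil l k (by rw [← hS]; exact hmem)
        rw [List.filter_append, h0]
        simp [hk]
      rw [List.flatMap_congr hf1, List.flatMap_congr hf2, hfk]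
      conv_lhs => rw [hKsplit, List.flatMap_append]
      have hsplit := pvInsertBy_split (fun a b : Int × α => decide (b.1 < a.1)) e
          (K1.flatMap (fun k' => l.filter (fun e => e.1 == k')))
          (K2.flatMap (fun k' => l.filter (fun e => e.1 == k')))
          (by
            intro a ha
            have := pvMem_flatMap_fst K1 l a ha
            have := hb1 a.1 this
            simp only [decide_eq_false_iff_not, ← hk]
            exact not_lt.mpr (le_of_lt this)
          )
          (by
            intro b hb
            have := pvMem_flatMap_fst K2 l b hb
            have := hb2 b.1 this
            simpa [← hk] using this
          )
      rw [hsplit]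
      simp

-- ---- joining the two shapes ----

-- a bucket of A's tagged list is a plain overlap filter (for positive keys)
lemma pvBucket_eq_filter (qw : PySem.Set String) (kb : List (List (String × String))) (k : Int) (hk : 0 < k) :
    ((pvTagged qw kb).filter (fun e => e.1 == k)).map (fun e => e.2)
      = kb.filter (fun d => pvOverlap qw d == k) := by
  have hpred : ∀ d ∈ kb, (((fun e : Int × List (String × String) => e.1 == k) ∘
        fun doc => (pvOverlap qw doc, doc)) d && decide (0 < pvOverlap qw d))
      = (pvOverlap qw d == k) := by
    intro d _
    by_cases h : pvOverlap qw d = k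
    · simp [Function.comp, h]; omega
    · simp [Function.comp, h]
  simp only [pvTagged, List.filter_map, List.map_map, List.filter_filter]
  rw [List.filter_congr hpred]
  rw [show ((fun e : Int × List (String × String) => e.2) ∘
      fun doc => (pvOverlap qw doc, doc)) = (fun d => d) from rfl]
  exact List.map_id' _

-- a flatMap over a strictly descending list collapses to the strictly descending sublist
-- of keys with non-empty buckets
lemma pvFlatMap_range_eq {α : Type} (R K : List Int) (G : Int → List α)
    (hR : R.Pairwise (fun a b => b < a)) (hK : K.Pairwise (fun a b => b < a))
    (hsub : ∀ k ∈ K, k ∈ R) (hnil : ∀ s ∈ R, s ∉ K → G s = []) :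
    R.flatMap G = K.flatMap G := by
  have h1 : ∀ (R' : List Int), (∀ s ∈ R', s ∉ K → G s = []) →
      R'.flatMap G = (R'.filter (fun s => decide (s ∈ K))).flatMap G := by
    intro R' h
    induction R' with
    | nil => rfl
    | cons r rs ih =>
      have ih' := ih (fun s hs hns => h s (List.mem_cons_of_mem _ hs) hns)
      by_cases hr : r ∈ K
      · simp only [List.flatMap_cons, List.filter_cons, hr, decide_true, if_true,
          List.flatMap_cons, ih']
      · simp only [List.flatMap_cons, List.filter_cons, hr, decide_false,
          Bool.false_eq_true, if_false, h r List.mem_cons_self hr, List.nil_append, ih']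
  rw [h1 R hnil]
  congr 1
  have hndR : R.Nodup := hR.imp (fun {a b} h => by omega)
  have hndK : K.Nodup := hK.imp (fun {a b} h => by omega)
  have hndF : (R.filter (fun s => decide (s ∈ K))).Nodup := hndR.filter _
  have hperm : (R.filter (fun s => decide (s ∈ K))).Perm K := by
    rw [List.perm_ext_iff_of_nodup hndF hndK]
    intro a
    simp only [List.mem_filter, decide_eq_true_eq]
    exact ⟨fun h => h.2, fun h => ⟨hsub a h, h⟩⟩
  exact List.eq_of_perm_of_sorted
    (fun a b _ _ h1 h2 => absurd h1 (lt_asymm h2)) (hR.filter _) hK hperm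

-- every overlap is at most the number of query words
lemma pvOverlap_le (qw : PySem.Set String) (doc : List (String × String)) :
    pvOverlap qw doc ≤ PySem.Set.len qw := by
  simp only [pvOverlap, PySem.Set.len, PySem.Set.inter, PySem.List.len_eq]
  exact_mod_cast List.length_filter_le _ _

-- assembly: the two ports agree on every input
set_option maxHeartbeats 1000000 in
lemma pvMain (query : String) (knowledge_base : List (List (String × String))) :
    rag_retrieval query knowledge_base = rag_retrieval_alt query knowledge_base := by
  simp only [rag_retrieval, rag_retrieval_alt]
  rw [pvFoldA, List.nil_append]
  set qw := pvTok query with hqw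
  set kb := knowledge_base with hkb
  set SCORE := (qw.foldl (fun sc w =>
      (((PySem.List.enumerate kb 0).foldl (fun d p =>
          (pvDocTok p.2).foldl (fun d w => d.insert w (d.getD w [] ++ [p.1])) d)
        PySem.Dict.empty).getD w []).foldl (fun sc i =>
        PySem.List.pySetD sc i (PySem.List.pyGetD sc i 0 + 1)) sc)
      (List.replicate kb.length (0 : Int))) with hSCORE
  have hscore : ∀ p ∈ PySem.List.enumerate kb 0,
      PySem.List.pyGetD SCORE p.1 0 = pvOverlap qw p.2 := by
    intro p hp
    rcases (PySem.List.mem_enumerate_iff _ _ _).mp hp with ⟨m, hm, rfl⟩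
    rw [hSCORE]
    have := pvScoreAt qw kb m hm
    simpa using this
  have hfilt : ∀ s : Int, ((PySem.List.enumerate kb 0).filter
        (fun p => pvOverlap qw p.2 == s)).map (fun p => p.2)
      = kb.filter (fun d => pvOverlap qw d == s) := by
    intro s
    conv_rhs => rw [show kb = (PySem.List.enumerate kb 0).map (fun p => p.2) from
      (PySem.List.map_snd_enumerate kb 0).symm]
    rw [List.filter_map]
    rfl
  have houter : ∀ (res : List (List (String × String))) (s : Int),
      (PySem.List.enumerate kb 0).foldl (fun result p =>
        if PySem.List.pyGetD SCORE p.1 0 == s then result ++ [p.2] else result) res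
      = res ++ kb.filter (fun d => pvOverlap qw d == s) := by
    intro res s
    rw [PySem.List.foldl_congr_mem _ _
        (fun result (p : Int × List (String × String)) =>
          if pvOverlap qw p.2 == s then result ++ [p.2] else result) _
        (by intro acc p hp; rw [hscore p hp])]
    rw [PySem.List.foldl_append_if (fun p : Int × List (String × String) => pvOverlap qw p.2 == s) (fun p : Int × List (String × String) => p.2) _ res]
    rw [hfilt]
  rw [PySem.List.foldl_congr_mem _ _
      (fun result (s : Int) => result ++ kb.filter (fun d => pvOverlap qw d == s)) _
      (by intro acc s _; rw [houter])]
  rw [PySem.List.foldl_append_eq_flatMap, List.nil_append]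
  rw [pvSorted_fst_eq_flatMap, List.map_flatMap]
  set K := PySem.List.sorted (PySem.Set.ofList ((pvTagged qw kb).map (fun e => e.1)))
      (fun k => k) true with hK
  have hKpos : ∀ k ∈ K, 0 < k := by
    intro k hk
    rw [hK, PySem.List.mem_sorted, PySem.Set.mem_ofList] at hk
    rcases List.mem_map.mp hk with ⟨e, he, rfl⟩
    rcases List.mem_map.mp (by simpa [pvTagged] using he : e ∈ (kb.filter
        (fun doc => decide (0 < pvOverlap qw doc))).map (fun doc => (pvOverlap qw doc, doc)))
      with ⟨d, hd, rfl⟩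
    exact of_decide_eq_true (List.mem_filter.mp hd).2
  have hRK : (PySem.List.pyRange (PySem.Set.len qw) 0 (-1)).flatMap
        (fun s => kb.filter (fun d => pvOverlap qw d == s))
      = K.flatMap (fun s => kb.filter (fun d => pvOverlap qw d == s)) := by
    apply pvFlatMap_range_eq
    · rw [PySem.List.pyRange_neg_one_eq_reverse, List.pairwise_reverse]
      exact (PySem.List.pairwise_lt_pyRange_one _ _).imp (fun {a b} h => h)
    · rw [hK]; exact pvDescKeys_pairwise _
    · intro k hk
      rw [PySem.List.mem_pyRange_neg_one]
      refine ⟨hKpos k hk, ?_⟩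
      rw [hK, PySem.List.mem_sorted, PySem.Set.mem_ofList] at hk
      rcases List.mem_map.mp hk with ⟨e, he, rfl⟩
      rcases List.mem_map.mp (by simpa [pvTagged] using he : e ∈ (kb.filter
          (fun doc => decide (0 < pvOverlap qw doc))).map (fun doc => (pvOverlap qw doc, doc)))
        with ⟨d, _, rfl⟩
      exact pvOverlap_le qw d
    · intro s hs hns
      rw [List.filter_eq_nil_iff]
      intro d hd hds
      apply hns
      have hs0 : 0 < s := (PySem.List.mem_pyRange_neg_one.mp hs).1
      have hov : pvOverlap qw d = s := beq_iff_eq.mp hds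
      rw [hK, PySem.List.mem_sorted, PySem.Set.mem_ofList]
      apply List.mem_map.mpr
      refine ⟨(pvOverlap qw d, d), ?_, by rw [hov]⟩
      simp only [pvTagged]
      exact List.mem_map.mpr ⟨d, List.mem_filter.mpr ⟨hd, by simp [hov, hs0]⟩, rfl⟩
  rw [hRK]
  exact List.flatMap_congr (fun k hk => pvBucket_eq_filter qw kb k (hKpos k hk))

-- ===== VERDICT (by name: the statement is the Claim_ definition above) =====
theorem rag_retrieval_spec : Claim_equal_rag_retrieval := by
  intro query knowledge_base _ _
  unfold Spec_rag_retrieval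
  exact pvMain query knowledge_base
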